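-- pv_equiv track=rewrite | github.com/rbtkhn/grace-mar | scripts/strategy/audit_refined_day_pages.py | appendix_issues
-- ===== SOURCE A (Python) =====
-- def appendix_issues(bullets: list[str]) -> list[str]:
--     if not bullets:
--         return ["appendix_no_bullets"]
--
--     def idx(pred) -> int | None:
--         for i, b in enumerate(bullets):
--             if pred(b.lower()):
--                 return i
--         return None
--
--     i_verbatim = idx(lambda b: "full verbatim" in b)
--     i_inbox = idx(lambda b: "inbox" in b and ("triage" in b or "daily-strategy" in b))
--     i_thread = idx(lambda b: "`thread:" in b)
--     i_canon = idx(
--         lambda b: "canonical primary" in b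
--         or "canonical video" in b
--         or "canonical url" in b
--         or b.strip().startswith("- **canonical")
--     )
--
--     iss: list[str] = []
--     if i_verbatim is None:
--         iss.append("appendix_missing_full_verbatim_bullet")
--     if i_inbox is None:
--         iss.append("appendix_missing_inbox_triage_bullet")
--     if i_thread is None:
--         iss.append("appendix_missing_thread_line_bullet")
--     if i_canon is None:
--         iss.append("appendix_missing_canonical_primary_bullet")
--
--     order = [i for i in (i_verbatim, i_inbox, i_thread, i_canon) if i is not None]
--     if len(order) >= 2 and order != sorted(order):
--         iss.append("appendix_required_bullets_out_of_order")
--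
--     return iss
-- ===== SOURCE B (Python) =====
-- def appendix_issues(bullets: list[str]) -> list[str]:
--     if not bullets:
--         return ["appendix_no_bullets"]
--
--     iv = ii = it = ic = None
--     for i, raw in enumerate(bullets):
--         b = raw.lower()
--         if iv is None and "full verbatim" in b:
--             iv = i
--         if ii is None and "inbox" in b and ("triage" in b or "daily-strategy" in b):
--             ii = i
--         if it is None and "`thread:" in b:
--             it = i
--         if ic is None and (
--             "canonical primary" in b
--             or "canonical video" in b
--             or "canonical url" in b
--             or b.strip().startswith("- **canonical")
--         ):
--             ic = i
--         if iv is not None and ii is not None and it is not None and ic is not None: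
--             break
--
--     iss = [
--         msg
--         for found, msg in (
--             (iv, "appendix_missing_full_verbatim_bullet"),
--             (ii, "appendix_missing_inbox_triage_bullet"),
--             (it, "appendix_missing_thread_line_bullet"),
--             (ic, "appendix_missing_canonical_primary_bullet"),
--         )
--         if found is None
--     ]
--
--     prev = None
--     ok = True
--     cnt = 0
--     for x in (iv, ii, it, ic):
--         if x is None:
--             continue
--         if prev is not None and x < prev:
--             ok = False
--         prev = x
--         cnt += 1
--     if cnt >= 2 and not ok:
--         iss.append("appendix_required_bullets_out_of_order")
--     return iss
-- ===== Notes on version B (the rewrite author's own statement) =====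
-- stated objective: alternative
-- what changed: Fused A's four separate enumerate scans into one early-exiting pass that tracks the four first-match indices simultaneously, and replaced the sort-and-compare order check by a single adjacent-comparison fold.
import Mathlib
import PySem

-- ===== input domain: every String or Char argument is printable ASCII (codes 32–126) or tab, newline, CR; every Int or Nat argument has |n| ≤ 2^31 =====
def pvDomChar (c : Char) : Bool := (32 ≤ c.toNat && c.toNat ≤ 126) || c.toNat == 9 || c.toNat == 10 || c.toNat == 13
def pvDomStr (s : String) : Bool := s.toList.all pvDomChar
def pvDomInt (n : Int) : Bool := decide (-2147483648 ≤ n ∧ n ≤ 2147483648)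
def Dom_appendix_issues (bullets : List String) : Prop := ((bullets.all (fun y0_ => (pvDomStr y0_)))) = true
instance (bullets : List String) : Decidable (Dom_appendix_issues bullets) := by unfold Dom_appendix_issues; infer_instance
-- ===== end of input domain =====

-- B fuses A's four separate scans into one early-exiting pass and replaces the sort-based
-- order check by an adjacent-comparison fold (objective: alternative, same asymptotic cost).

-- shared predicate helpers (the four lambdas of A, also the four conditions of B)
def pvPredV (b : String) : Bool := PySem.Str.isIn "full verbatim" b
def pvPredI (b : String) : Bool :=
  PySem.Str.isIn "inbox" b && (PySem.Str.isIn "triage" b || PySem.Str.isIn "daily-strategy" b)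
def pvPredT (b : String) : Bool := PySem.Str.isIn "`thread:" b
def pvPredC (b : String) : Bool :=
  PySem.Str.isIn "canonical primary" b || PySem.Str.isIn "canonical video" b ||
  PySem.Str.isIn "canonical url" b ||
  PySem.Str.startswith (PySem.Str.strip b) "- **canonical"

-- ===== PORT A =====
-- A's inner helper idx: first index in enumerate(bullets) whose lowered text satisfies pred
def pvIdxA (pred : String → Bool) : List (Int × String) → Option Int
  | [] => none
  | (i, b) :: rest => if pred (PySem.Str.lower b) then some i else pvIdxA pred rest

def appendix_issues (bullets : List String) : List String :=
  if bullets = [] then ["appendix_no_bullets"]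
  else
    let en := PySem.List.enumerate bullets
    let i_verbatim := pvIdxA pvPredV en
    let i_inbox := pvIdxA pvPredI en
    let i_thread := pvIdxA pvPredT en
    let i_canon := pvIdxA pvPredC en
    let iss : List String := []
    let iss := if i_verbatim = none then iss ++ ["appendix_missing_full_verbatim_bullet"] else iss
    let iss := if i_inbox = none then iss ++ ["appendix_missing_inbox_triage_bullet"] else iss
    let iss := if i_thread = none then iss ++ ["appendix_missing_thread_line_bullet"] else iss
    let iss := if i_canon = none then iss ++ ["appendix_missing_canonical_primary_bullet"] else iss
    let order := [i_verbatim, i_inbox, i_thread, i_canon].filterMap id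
    let iss := if 2 ≤ order.length ∧ order ≠ PySem.List.sorted order (fun x => x) false
               then iss ++ ["appendix_required_bullets_out_of_order"] else iss
    iss

-- ===== PORT B =====
-- B's single pass: update each still-None first-match index, break once all four are found
-- 'if x is None and pred(b): x = i' as an expression
def pvSetIfNone (x : Option Int) (p : Bool) (i : Int) : Option Int :=
  if x.isNone && p then some i else x

def pvGoB (l : List (Int × String)) (iv ii it ic : Option Int) :
    Option Int × Option Int × Option Int × Option Int :=
  match l with
  | [] => (iv, ii, it, ic)
  | (i, raw) :: rest =>
    let b := PySem.Str.lower raw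
    let iv := pvSetIfNone iv (pvPredV b) i
    let ii := pvSetIfNone ii (pvPredI b) i
    let it := pvSetIfNone it (pvPredT b) i
    let ic := pvSetIfNone ic (pvPredC b) i
    if iv.isSome && ii.isSome && it.isSome && ic.isSome then (iv, ii, it, ic)
    else pvGoB rest iv ii it ic

def appendix_issues_alt (bullets : List String) : List String :=
  if bullets = [] then ["appendix_no_bullets"]
  else
    let (iv, ii, it, ic) := pvGoB (PySem.List.enumerate bullets) none none none none
    let iss := ([(iv, "appendix_missing_full_verbatim_bullet"),
                 (ii, "appendix_missing_inbox_triage_bullet"),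
                 (it, "appendix_missing_thread_line_bullet"),
                 (ic, "appendix_missing_canonical_primary_bullet")]).filterMap
                (fun q => if q.1 = none then some q.2 else none)
    let st := [iv, ii, it, ic].foldl
      (fun (st : Option Int × Bool × Int) x =>
        match x with
        | none => st
        | some v =>
          let ok := match st.1 with
            | some p => if v < p then false else st.2.1
            | none => st.2.1
          (some v, ok, st.2.2 + 1))
      (none, true, 0)
    if 2 ≤ st.2.2 ∧ st.2.1 = false
    then iss ++ ["appendix_required_bullets_out_of_order"] else iss

-- ===== PRECONDITION & SPEC =====
def Spec_appendix_issues (bullets : List String) (out : List String) : Prop := out = appendix_issues_alt bullets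
instance (bullets : List String) (out : List String) : Decidable (Spec_appendix_issues bullets out) := by unfold Spec_appendix_issues; infer_instance

-- ===== CLAIM (what is proved, stated in full; the proofs are below) =====
def Claim_equal_appendix_issues : Prop := ∀ (bullets : List String), Dom_appendix_issues bullets → Spec_appendix_issues bullets (appendix_issues bullets)

-- ===== LEMMAS AND PROOFS =====

theorem pvSetIfNone_or (acc : Option Int) (p : Bool) (i : Int) (r : Option Int) :
    (pvSetIfNone acc p i).or r = acc.or (if p = true then some i else r) := by
  unfold pvSetIfNone; cases acc <;> cases p <;> simp

theorem pvSetIfNone_some (acc : Option Int) (p : Bool) (i : Int) (r : Option Int)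
    (h : (pvSetIfNone acc p i).isSome = true) :
    pvSetIfNone acc p i = acc.or (if p = true then some i else r) := by
  unfold pvSetIfNone at *; cases acc <;> cases p <;> simp_all

theorem pvGoB_eq (l : List (Int × String)) (iv ii it ic : Option Int) :
    pvGoB l iv ii it ic =
      (iv.or (pvIdxA pvPredV l), ii.or (pvIdxA pvPredI l),
       it.or (pvIdxA pvPredT l), ic.or (pvIdxA pvPredC l)) := by
  induction l generalizing iv ii it ic with
  | nil => simp [pvGoB, pvIdxA]
  | cons x rest ih =>
    obtain ⟨i, raw⟩ := x
    simp only [pvGoB, pvIdxA]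
    split
    · next h =>
      simp only [Bool.and_eq_true] at h
      obtain ⟨⟨⟨h1, h2⟩, h3⟩, h4⟩ := h
      simp only [Prod.mk.injEq]
      exact ⟨pvSetIfNone_some _ _ _ _ h1, pvSetIfNone_some _ _ _ _ h2,
             pvSetIfNone_some _ _ _ _ h3, pvSetIfNone_some _ _ _ _ h4⟩
    · rw [ih]
      simp only [Prod.mk.injEq]
      exact ⟨pvSetIfNone_or _ _ _ _, pvSetIfNone_or _ _ _ _,
             pvSetIfNone_or _ _ _ _, pvSetIfNone_or _ _ _ _⟩

theorem pvSortedEqSelf_iff (o : List Int) :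
    o = PySem.List.sorted o (fun x => x) false ↔ o.Pairwise (· ≤ ·) := by
  constructor
  · intro h
    rw [h]
    apply PySem.List.sorted_pairwise
  · intro h
    exact (PySem.List.sorted_eq_self_of_pairwise o (fun x => x) h).symm

theorem pvIf_congr (c d : Prop) [Decidable c] [Decidable d] (h : c ↔ d) (x y : List String) :
    (if c then x else y) = (if d then x else y) := by
  split_ifs with h1 h2 <;> tauto

-- ===== VERDICT (by name: the statement is the Claim_ definition above) =====
theorem appendix_issues_spec : Claim_equal_appendix_issues := by
  intro bullets _
  unfold Spec_appendix_issues appendix_issues appendix_issues_alt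
  by_cases hb : bullets = []
  · simp [hb]
  · simp only [hb, if_false, pvGoB_eq, Option.none_or]
    generalize pvIdxA pvPredV (PySem.List.enumerate bullets) = iv
    generalize pvIdxA pvPredI (PySem.List.enumerate bullets) = ii
    generalize pvIdxA pvPredT (PySem.List.enumerate bullets) = it
    generalize pvIdxA pvPredC (PySem.List.enumerate bullets) = ic
    cases iv <;> cases ii <;> cases it <;> cases ic
    all_goals simp [pvSortedEqSelf_iff]
    all_goals apply pvIf_congr
    all_goals omega
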